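-- pv_equiv track=rewrite | github.com/ACD421/information-network-theory | codes/derive_lithium_v2.py | fill_S2
-- ===== SOURCE A (Python) =====
-- N = 3
--
-- def fill_S2(A):
--     """Fill A nucleons into S²₃ shells. Returns (n0, n1, n2, sum_l, sum_ll1)"""
--     remaining = A
--     filling = []
--     sum_l = 0
--     sum_ll1 = 0
--     for l in range(N):
--         cap = 2 * l + 1
--         n = min(remaining, cap)
--         filling.append(n)
--         sum_l += n * l
--         sum_ll1 += n * l * (l + 1)
--         remaining -= n
--         if remaining <= 0:
--             break
--     while len(filling) < N:
--         filling.append(0)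
--     return filling[0], filling[1], filling[2], sum_l, sum_ll1
-- ===== SOURCE B (Python) =====
-- N = 3
--
-- def fill_S2(A):
--     """Fill A nucleons into S²₃ shells. Returns (n0, n1, n2, sum_l, sum_ll1)"""
--     n0 = min(A, 1)
--     n1 = min(max(A - 1, 0), 3)
--     n2 = min(max(A - 4, 0), 5)
--     return n0, n1, n2, n1 + 2 * n2, 2 * n1 + 6 * n2
-- ===== Notes on version B (the rewrite author's own statement) =====
-- stated objective: simpler
-- what changed: Replaced the shell-filling loop with break and padding by closed-form occupancies n0=min(A,1), n1=min(max(A-1,0),3), n2=min(max(A-4,0),5) and direct weighted sums.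
import Mathlib
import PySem

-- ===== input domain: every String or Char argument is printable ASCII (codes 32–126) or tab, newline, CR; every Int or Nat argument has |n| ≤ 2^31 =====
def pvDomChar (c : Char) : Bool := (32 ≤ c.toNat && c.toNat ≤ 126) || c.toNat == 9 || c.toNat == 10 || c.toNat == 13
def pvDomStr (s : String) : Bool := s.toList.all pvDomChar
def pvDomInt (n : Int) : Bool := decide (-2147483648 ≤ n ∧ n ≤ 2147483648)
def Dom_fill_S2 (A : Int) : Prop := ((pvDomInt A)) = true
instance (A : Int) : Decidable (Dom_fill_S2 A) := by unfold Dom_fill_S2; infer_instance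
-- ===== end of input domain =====

-- B replaces A's shell-filling loop (with break and zero-padding) by closed-form occupancies; simpler, same values.

-- ===== PORT A =====
-- loop over the shell indices l of range(N); the `if remaining <= 0: break` ends the loop early
def fill_S2_loop : List Int → Int → List Int → Int → Int → (List Int × Int × Int)
  | [], _remaining, filling, sum_l, sum_ll1 => (filling, sum_l, sum_ll1)
  | l :: ls, remaining, filling, sum_l, sum_ll1 =>
      let cap := 2 * l + 1
      let n := min remaining cap
      let filling' := filling ++ [n]
      let sum_l' := sum_l + n * l
      let sum_ll1' := sum_ll1 + n * l * (l + 1)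
      let remaining' := remaining - n
      if remaining' ≤ 0 then (filling', sum_l', sum_ll1')
      else fill_S2_loop ls remaining' filling' sum_l' sum_ll1'

-- `while len(filling) < N: filling.append(0)`
def fill_S2_pad (filling : List Int) : List Int :=
  if filling.length < 3 then fill_S2_pad (filling ++ [0]) else filling
  termination_by 3 - filling.length
  decreasing_by simp; omega

def fill_S2 (A : Int) : Int × Int × Int × Int × Int :=
  let r := fill_S2_loop (PySem.List.pyRange 0 3 1) A [] 0 0
  let filling := fill_S2_pad r.1
  -- filling has length 3 here, so Python's filling[0..2] never raises; getD 0 is unreachable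
  ((PySem.List.pyGet? filling 0).getD 0, (PySem.List.pyGet? filling 1).getD 0, (PySem.List.pyGet? filling 2).getD 0, r.2.1, r.2.2)

-- ===== PORT B =====
def fill_S2_alt (A : Int) : Int × Int × Int × Int × Int :=
  let n0 := min A 1
  let n1 := min (max (A - 1) 0) 3
  let n2 := min (max (A - 4) 0) 5
  (n0, n1, n2, n1 + 2 * n2, 2 * n1 + 6 * n2)

-- ===== PRECONDITION & SPEC =====
def Spec_fill_S2 (A : Int) (out : Int × Int × Int × Int × Int) : Prop := out = fill_S2_alt A
instance (A : Int) (out : Int × Int × Int × Int × Int) : Decidable (Spec_fill_S2 A out) := by unfold Spec_fill_S2; infer_instance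

-- ===== CLAIM (what is proved, stated in full; the proofs are below) =====
def Claim_equal_fill_S2 : Prop := ∀ (A : Int), Dom_fill_S2 A → Spec_fill_S2 A (fill_S2 A)

-- ===== LEMMAS AND PROOFS =====

-- ===== VERDICT (by name: the statement is the Claim_ definition above) =====
theorem fill_S2_spec : Claim_equal_fill_S2 := by
  intro A _
  show fill_S2 A = fill_S2_alt A
  have hr : PySem.List.pyRange 0 3 1 = [0, 1, 2] := by decide
  simp only [fill_S2, fill_S2_alt, hr, fill_S2_loop]
  split_ifs with h0 h1 <;>
    simp [fill_S2_pad, PySem.List.pyGet?, PySem.List.pyIdx?, Prod.ext_iff] <;> omega
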